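-- pv_equiv track=rewrite | github.com/IorenzoLF/Le_Refuge | Le_refuge/tools/maintenance/optimiseur_temples_dominants.py | _creer_connexions_rituels_internes
-- ===== SOURCE A (Python) =====
-- def _creer_connexions_rituels_internes(groupes):
--     connexions = []
--     for i, (groupe1, elements1) in enumerate(groupes.items()):
--         for j, (groupe2, elements2) in enumerate(groupes.items()):
--             if i < j and elements1 and elements2:
--                 connexions.append({
--                     "source": groupe1,
--                     "cible": groupe2,
--                     "type": "optimisation_rituels",
--                     "force": "forte"
--                 })
--     return connexions
-- ===== SOURCE B (Python) =====
-- def _creer_connexions_rituels_internes(groupes):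
--     noms = [groupe for groupe, elements in groupes.items() if elements]
--     connexions = []
--     while noms:
--         source = noms.pop(0)
--         for cible in noms:
--             connexions.append({
--                 "source": source,
--                 "cible": cible,
--                 "type": "optimisation_rituels",
--                 "force": "forte"
--             })
--     return connexions
-- ===== Notes on version B (the rewrite author's own statement) =====
-- stated objective: simpler
-- what changed: B first filters the group names with non-empty element lists in one pass, then emits one connection per ordered pair of that filtered list (head against rest, shrinking), replacing A's nested double enumerate with an i<j index guard and repeated emptiness tests.
import Mathlib
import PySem

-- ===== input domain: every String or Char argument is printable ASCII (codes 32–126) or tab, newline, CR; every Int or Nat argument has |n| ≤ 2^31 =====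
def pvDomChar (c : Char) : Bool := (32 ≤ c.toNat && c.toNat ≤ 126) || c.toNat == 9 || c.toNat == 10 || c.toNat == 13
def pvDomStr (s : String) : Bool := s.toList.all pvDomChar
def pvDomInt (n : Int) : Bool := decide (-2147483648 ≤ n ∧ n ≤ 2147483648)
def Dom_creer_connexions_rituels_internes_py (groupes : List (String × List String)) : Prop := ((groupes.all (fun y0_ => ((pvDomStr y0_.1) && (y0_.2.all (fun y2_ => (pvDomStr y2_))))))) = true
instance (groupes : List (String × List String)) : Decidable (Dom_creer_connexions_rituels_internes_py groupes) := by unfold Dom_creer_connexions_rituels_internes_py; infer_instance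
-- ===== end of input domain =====

-- B replaces A's nested double-enumerate with an i<j guard by one filter pass over the
-- groups followed by a head-against-rest pass over the filtered names (objective: simpler).

-- ===== PORT A =====
-- the literal dict appended for a pair (source, cible)
def pvConn (g1 g2 : String) : List (String × String) :=
  [("source", g1), ("cible", g2), ("type", "optimisation_rituels"), ("force", "forte")]

def creer_connexions_rituels_internes_py (groupes : List (String × List String)) : List (List (String × String)) :=
  let items := (PySem.Dict.ofList groupes).items
  (PySem.List.enumerate items).foldl (fun connexions p1 =>
    (PySem.List.enumerate items).foldl (fun connexions p2 =>
      if p1.1 < p2.1 ∧ p1.2.2 ≠ [] ∧ p2.2.2 ≠ [] then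
        connexions ++ [pvConn p1.2.1 p2.2.1]
      else connexions) connexions) []

-- ===== PORT B =====
-- 'while noms: source = noms.pop(0); for cible in noms: connexions.append(...)'
def pvCombos2 : List String → List (List (String × String))
  | [] => []
  | source :: noms => noms.map (fun cible => pvConn source cible) ++ pvCombos2 noms

def creer_connexions_rituels_internes_py_alt (groupes : List (String × List String)) : List (List (String × String)) :=
  let noms := ((PySem.Dict.ofList groupes).items.filter (fun p => !p.2.isEmpty)).map (·.1)
  pvCombos2 noms

-- ===== PRECONDITION & SPEC =====
def Spec_creer_connexions_rituels_internes_py (groupes : List (String × List String)) (out : List (List (String × String))) : Prop := out = creer_connexions_rituels_internes_py_alt groupes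
instance (groupes : List (String × List String)) (out : List (List (String × String))) : Decidable (Spec_creer_connexions_rituels_internes_py groupes out) := by unfold Spec_creer_connexions_rituels_internes_py; infer_instance

-- ===== CLAIM (what is proved, stated in full; the proofs are below) =====
def Claim_equal_creer_connexions_rituels_internes_py : Prop := ∀ (groupes : List (String × List String)), Dom_creer_connexions_rituels_internes_py groupes → Spec_creer_connexions_rituels_internes_py groupes (creer_connexions_rituels_internes_py groupes)

-- ===== LEMMAS AND PROOFS =====

-- A's inner loop is an append-if fold: it appends the filtered, mapped row.
theorem pv_inner_eq (p1 : Int × String × List String)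
    (E : List (Int × String × List String)) (acc : List (List (String × String))) :
    E.foldl (fun connexions p2 =>
      if p1.1 < p2.1 ∧ p1.2.2 ≠ [] ∧ p2.2.2 ≠ [] then
        connexions ++ [pvConn p1.2.1 p2.2.1]
      else connexions) acc
    = acc ++ (E.filter (fun p2 => decide (p1.1 < p2.1 ∧ p1.2.2 ≠ [] ∧ p2.2.2 ≠ []))).map
        (fun p2 => pvConn p1.2.1 p2.2.1) := by
  induction E generalizing acc with
  | nil => simp
  | cons q E ih =>
    rw [List.foldl_cons, List.filter_cons]
    by_cases h : p1.1 < q.1 ∧ p1.2.2 ≠ [] ∧ q.2.2 ≠ []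
    · rw [if_pos h, ih]; simp [h]
    · rw [if_neg h, ih]; simp [h]

-- A's double loop in flatMap form
theorem pv_flat (M L : List (Int × String × List String)) (acc : List (List (String × String))) :
    M.foldl (fun connexions p1 =>
      L.foldl (fun connexions p2 =>
        if p1.1 < p2.1 ∧ p1.2.2 ≠ [] ∧ p2.2.2 ≠ [] then
          connexions ++ [pvConn p1.2.1 p2.2.1]
        else connexions) connexions) acc
    = acc ++ M.flatMap (fun p1 =>
        (L.filter (fun p2 => decide (p1.1 < p2.1 ∧ p1.2.2 ≠ [] ∧ p2.2.2 ≠ []))).map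
          (fun p2 => pvConn p1.2.1 p2.2.1)) := by
  induction M generalizing acc with
  | nil => simp
  | cons r M ihM =>
    rw [List.foldl_cons, pv_inner_eq, ihM, List.flatMap_cons, List.append_assoc]

-- the enumerate indices in the tail are all above the start
theorem pv_enum_fst_lt {gs : List (String × List String)} {s : Int}
    {p : Int × String × List String} (hp : p ∈ PySem.List.enumerate gs (s + 1)) :
    s < p.1 := by
  rcases (PySem.List.mem_enumerate_iff _ _ _).1 hp with ⟨k, hk, rfl⟩
  have : (0 : Int) ≤ (k : Int) := Int.natCast_nonneg k
  omega

-- mapping the name out of the filtered enumerate forgets the indices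
theorem pv_names_eq (g : String) (gs : List (String × List String)) (s : Int) :
    ((PySem.List.enumerate gs s).filter (fun p => decide (p.2.2 ≠ []))).map
        (fun p => pvConn g p.2.1)
    = ((gs.filter (fun p => !p.2.isEmpty)).map (·.1)).map (fun c => pvConn g c) := by
  induction gs generalizing s with
  | nil => simp [PySem.List.enumerate]
  | cons q gs ih =>
    rw [PySem.List.enumerate_cons, List.filter_cons]
    by_cases h : q.2 = []
    · simpa [h] using ih (s + 1)
    · simpa [h, List.isEmpty_iff] using ih (s + 1)

-- main lemma, in flatMap form: A's pair enumeration equals B's two passes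
theorem pv_main (gs : List (String × List String)) (s : Int) :
    (PySem.List.enumerate gs s).flatMap (fun p1 =>
      ((PySem.List.enumerate gs s).filter
          (fun p2 => decide (p1.1 < p2.1 ∧ p1.2.2 ≠ [] ∧ p2.2.2 ≠ []))).map
        (fun p2 => pvConn p1.2.1 p2.2.1))
    = pvCombos2 ((gs.filter (fun p => !p.2.isEmpty)).map (·.1)) := by
  induction gs generalizing s with
  | nil => simp [PySem.List.enumerate, pvCombos2]
  | cons q gs ih =>
    rw [PySem.List.enumerate_cons, List.flatMap_cons]
    -- tail rows: the head never qualifies as p2 for a tail p1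
    have htail : (PySem.List.enumerate gs (s + 1)).flatMap (fun p1 =>
          (((s, q) :: PySem.List.enumerate gs (s + 1)).filter
              (fun p2 => decide (p1.1 < p2.1 ∧ p1.2.2 ≠ [] ∧ p2.2.2 ≠ []))).map
            (fun p2 => pvConn p1.2.1 p2.2.1))
        = (PySem.List.enumerate gs (s + 1)).flatMap (fun p1 =>
          ((PySem.List.enumerate gs (s + 1)).filter
              (fun p2 => decide (p1.1 < p2.1 ∧ p1.2.2 ≠ [] ∧ p2.2.2 ≠ []))).map
            (fun p2 => pvConn p1.2.1 p2.2.1)) := by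
      apply List.flatMap_congr
      intro p1 hp1
      have hlt : s < p1.1 := pv_enum_fst_lt hp1
      simp only [List.filter_cons]
      rw [if_neg (by simp; omega)]
    rw [htail, ih]
    by_cases h : q.2 = []
    · -- empty head group: head row is empty and the name is filtered out
      simp [h]
    · -- non-empty head group: the head row is exactly B's head-against-rest pass
      have hf : (PySem.List.enumerate gs (s + 1)).filter
            (fun p2 => decide (s < p2.1 ∧ q.2 ≠ [] ∧ p2.2.2 ≠ []))
          = (PySem.List.enumerate gs (s + 1)).filter (fun p => decide (p.2.2 ≠ [])) := by
        apply List.filter_congr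
        intro p hp
        simp [h, pv_enum_fst_lt hp]
      have hhead : (((s, q) :: PySem.List.enumerate gs (s + 1)).filter
            (fun p2 => decide ((s, q).1 < p2.1 ∧ (s, q).2.2 ≠ [] ∧ p2.2.2 ≠ []))).map
            (fun p2 => pvConn (s, q).2.1 p2.2.1)
          = ((gs.filter (fun p => !p.2.isEmpty)).map (·.1)).map (fun c => pvConn q.1 c) := by
        rw [List.filter_cons, if_neg (by simp)]
        rw [show (fun p2 : Int × String × List String =>
            decide ((s, q).1 < p2.1 ∧ (s, q).2.2 ≠ [] ∧ p2.2.2 ≠ [])) =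
            (fun p2 : Int × String × List String =>
            decide (s < p2.1 ∧ q.2 ≠ [] ∧ p2.2.2 ≠ [])) from rfl]
        rw [hf]
        exact pv_names_eq q.1 gs (s + 1)
      rw [hhead]
      simp [h, pvCombos2]

-- ===== VERDICT (by name: the statement is the Claim_ definition above) =====
theorem creer_connexions_rituels_internes_py_spec : Claim_equal_creer_connexions_rituels_internes_py := by
  intro groupes _
  unfold Spec_creer_connexions_rituels_internes_py creer_connexions_rituels_internes_py creer_connexions_rituels_internes_py_alt
  rw [pv_flat, List.nil_append, pv_main]
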